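-- pv_equiv track=rewrite | github.com/lingpy/lingrex | src/lingrex/align.py | align_to_template
-- ===== SOURCE A (Python) =====
-- def align_to_template(sequence, structures, template, gap="-"):
--     """
--     Align a sequence to a template.
--     """
--     if (len(sequence) != len(structures)) or (len(template) < len(sequence)):
--         raise ValueError(
--             "sequence {0} and structure {1} have different length".format(
--                 repr(sequence), repr(structures)
--             )
--         )
--     if len([x for x in structures if x not in template]) != 0:
--         raise ValueError(
--             "{0} items in the structure {1} is not in the template".format(
--                 len([x for x in structures if x not in template]), repr(structures)
--             )
--         )
--
--     out = []
--     idxA, idxB = 0, 0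
--     while idxB < len(template):
--         if idxA < len(sequence):
--             segment, structure = sequence[idxA], structures[idxA]
--         else:
--             segment, structure = gap, ""
--         current_structure = template[idxB]
--         if current_structure == structure:
--             out.append(segment)
--             idxA += 1
--         else:
--             out.append(gap)
--         idxB += 1
--
--     return out
-- ===== SOURCE B (Python) =====
-- def align_to_template(sequence, structures, template, gap="-"):
--     """
--     Align a sequence to a template.
--     """
--     if (len(sequence) != len(structures)) or (len(template) < len(sequence)):
--         raise ValueError(
--             "sequence {0} and structure {1} have different length".format(
--                 repr(sequence), repr(structures)
--             )
--         )
--     if len([x for x in structures if x not in template]) != 0: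
--         raise ValueError(
--             "{0} items in the structure {1} is not in the template".format(
--                 len([x for x in structures if x not in template]), repr(structures)
--             )
--         )
--
--     # Phase 1: place each segment at the first template slot (left to right)
--     # whose structure matches; stop placing once no further slot matches.
--     placed = {}
--     pos = 0
--     for segment, structure in zip(sequence, structures):
--         try:
--             pos = template.index(structure, pos)
--         except ValueError:
--             break
--         placed[pos] = segment
--         pos += 1
--     # Phase 2: emit the template, gap-filling every unplaced slot.
--     return [placed.get(i, gap) for i in range(len(template))]
-- ===== Notes on version B (the rewrite author's own statement) =====
-- stated objective: alternative
-- what changed: Replaces A's single template-driven merge loop (two cursors, branch per template slot) by a two-phase algorithm: first a placement pass over the sequence that uses list.index(structure, pos) to map template positions to segments in a dict, then a comprehension over range(len(template)) that emits the placed segment or the gap.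
import Mathlib
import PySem

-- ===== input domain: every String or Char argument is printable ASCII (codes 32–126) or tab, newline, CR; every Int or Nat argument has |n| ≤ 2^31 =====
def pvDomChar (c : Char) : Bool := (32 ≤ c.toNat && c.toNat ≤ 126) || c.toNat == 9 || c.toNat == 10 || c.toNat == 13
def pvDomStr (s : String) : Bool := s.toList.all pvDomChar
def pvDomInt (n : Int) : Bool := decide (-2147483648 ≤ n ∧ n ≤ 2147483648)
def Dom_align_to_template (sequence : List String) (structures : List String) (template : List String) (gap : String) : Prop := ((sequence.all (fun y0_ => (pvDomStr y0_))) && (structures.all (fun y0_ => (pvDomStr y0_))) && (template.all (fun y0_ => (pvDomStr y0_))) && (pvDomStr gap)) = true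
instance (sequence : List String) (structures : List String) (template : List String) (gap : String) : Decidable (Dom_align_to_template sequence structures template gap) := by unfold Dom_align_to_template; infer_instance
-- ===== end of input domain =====

-- B replaces A's template-driven merge loop by a two-phase algorithm (a placement
-- pass over the sequence building a position→segment dict, then a gap-filling map
-- over the template positions); equivalence is proved on all inputs where A returns
-- (Pre_ excludes exactly A's two ValueError cases).

-- ===== PORT A =====
-- A's while loop, transliterated: idxA/idxB cursors, one append per template slot.
-- (A's two leading `raise ValueError` checks are excluded by Pre_align_to_template.)
def alignALoop (sequence : List String) (structures : List String) (template : List String) (gap : String) (idxA idxB : Nat) (out : List String) : List String :=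
  if _h : idxB < template.length then
    -- segment, structure = sequence[idxA], structures[idxA]  (in range inside Pre_) / gap, ""
    let ss : String × String :=
      if idxA < sequence.length then (sequence.getD idxA "", structures.getD idxA "")
      else (gap, "")
    let current_structure := template.getD idxB ""
    if current_structure = ss.2 then
      alignALoop sequence structures template gap (idxA + 1) (idxB + 1) (out ++ [ss.1])
    else
      alignALoop sequence structures template gap idxA (idxB + 1) (out ++ [gap])
  else out
termination_by template.length - idxB

def align_to_template (sequence : List String) (structures : List String) (template : List String) (gap : String) : List String :=
  alignALoop sequence structures template gap 0 0 []

-- ===== PORT B =====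
-- template.index(x, pos): first position ≥ pos holding x (none = ValueError, caught in B).
def indexFrom (xs : List String) (x : String) (i : Nat) : Option Nat :=
  if _h : i < xs.length then
    if xs.getD i "" = x then some i else indexFrom xs x (i + 1)
  else none
termination_by xs.length - i

-- Phase 1 of B: place each segment at the first matching template slot; stop on ValueError.
def placeLoop (template : List String) (pairs : List (String × String)) (pos : Nat) (placed : PySem.Dict Nat String) : PySem.Dict Nat String :=
  match pairs with
  | [] => placed
  | (segment, struc) :: rest =>   -- struc = Python's `structure` (Lean keyword)
    match indexFrom template struc pos with
    | none => placed
    | some p => placeLoop template rest (p + 1) (placed.insert p segment)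

def align_to_template_alt (sequence : List String) (structures : List String) (template : List String) (gap : String) : List String :=
  let placed := placeLoop template (sequence.zip structures) 0 PySem.Dict.empty
  (List.range template.length).map (fun i => placed.getD i gap)

-- ===== PRECONDITION & SPEC =====
-- Pre_ excludes exactly the inputs where Python A raises ValueError (and B raises the
-- same): mismatched lengths, a template shorter than the sequence, or a structure
-- symbol absent from the template.
def Pre_align_to_template (sequence : List String) (structures : List String) (template : List String) (gap : String) : Prop :=
  sequence.length = structures.length ∧ sequence.length ≤ template.length ∧ ∀ x ∈ structures, x ∈ template
instance (sequence : List String) (structures : List String) (template : List String) (gap : String) : Decidable (Pre_align_to_template sequence structures template gap) := by unfold Pre_align_to_template; infer_instance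

def pvWitness_align_to_template : List String × List String × List String × String :=
  (["p", "a"], ["c", "v"], ["c", "v", "c"], "-")

def Spec_align_to_template (sequence : List String) (structures : List String) (template : List String) (gap : String) (out : List String) : Prop := out = align_to_template_alt sequence structures template gap
instance (sequence : List String) (structures : List String) (template : List String) (gap : String) (out : List String) : Decidable (Spec_align_to_template sequence structures template gap out) := by unfold Spec_align_to_template; infer_instance

-- ===== CLAIM (what is proved, stated in full; the proofs are below) =====
def Claim_equal_align_to_template : Prop := ∀ (sequence : List String) (structures : List String) (template : List String) (gap : String), Dom_align_to_template sequence structures template gap → Pre_align_to_template sequence structures template gap → Spec_align_to_template sequence structures template gap (align_to_template sequence structures template gap)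

-- ===== LEMMAS AND PROOFS =====

-- Common reference form of the alignment: merge the template with the (segment,
-- structure) pairs, emitting a gap on mismatch and consuming a pair on match.
def goMerge (gap : String) : List String → List (String × String) → List String
  | [], _ => []
  | _t :: ts, [] => gap :: goMerge gap ts []
  | t :: ts, (s, c) :: rest =>
    if t = c then s :: goMerge gap ts rest else gap :: goMerge gap ts ((s, c) :: rest)

lemma alignALoop_eq (sequence structures template : List String) (gap : String)
    (hlen : sequence.length = structures.length) :
    ∀ n idxB idxA out, template.length - idxB ≤ n →
      alignALoop sequence structures template gap idxA idxB out
        = out ++ goMerge gap (template.drop idxB) ((sequence.zip structures).drop idxA) := by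
  intro n
  induction n with
  | zero =>
    intro idxB idxA out hn
    have hge : template.length ≤ idxB := by omega
    rw [alignALoop]
    simp [Nat.not_lt.mpr hge, List.drop_eq_nil_of_le hge, goMerge]
  | succ n ih =>
    intro idxB idxA out hn
    by_cases h : idxB < template.length
    · have hdropT : template.drop idxB = template[idxB] :: template.drop (idxB + 1) :=
        List.drop_eq_getElem_cons h
      rw [alignALoop]
      simp only [dif_pos h]
      by_cases hA : idxA < sequence.length
      · have hA' : idxA < structures.length := by omega
        have hzl : (sequence.zip structures).length = sequence.length := by
          simp [List.length_zip]; omega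
        have hAz : idxA < (sequence.zip structures).length := by omega
        have hdropZ : (sequence.zip structures).drop idxA
            = (sequence.zip structures)[idxA] :: (sequence.zip structures).drop (idxA + 1) :=
          List.drop_eq_getElem_cons hAz
        have hzip : (sequence.zip structures)[idxA] = (sequence[idxA], structures[idxA]) := by
          simp
        simp only [if_pos hA, List.getD_eq_getElem?_getD, List.getElem?_eq_getElem h,
          List.getElem?_eq_getElem hA, List.getElem?_eq_getElem hA', Option.getD_some]
        by_cases hc : template[idxB] = structures[idxA]
        · rw [if_pos hc, ih _ _ _ (by omega), hdropT, hdropZ, hzip, goMerge, if_pos hc]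
          simp
        · rw [if_neg hc, ih _ _ _ (by omega), hdropT, hdropZ, hzip, goMerge, if_neg hc]
          simp
      · have hzl : (sequence.zip structures).length = sequence.length := by
          simp [List.length_zip]; omega
        have hz1 : (sequence.zip structures).drop idxA = [] :=
          List.drop_eq_nil_of_le (by omega)
        have hz2 : (sequence.zip structures).drop (idxA + 1) = [] :=
          List.drop_eq_nil_of_le (by omega)
        simp only [if_neg hA]
        by_cases hc : template.getD idxB "" = ""
        · rw [if_pos hc, ih _ _ _ (by omega), hdropT, hz1, hz2]
          simp [goMerge]
        · rw [if_neg hc, ih _ _ _ (by omega), hdropT, hz1]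
          simp [goMerge]
    · have hge : template.length ≤ idxB := by omega
      rw [alignALoop]
      simp [Nat.not_lt.mpr hge, List.drop_eq_nil_of_le hge, goMerge]

lemma indexFrom_ge (xs : List String) (x : String) :
    ∀ n i p, xs.length - i ≤ n → indexFrom xs x i = some p → i ≤ p := by
  intro n
  induction n with
  | zero =>
    intro i p hn hi
    rw [indexFrom] at hi
    have : ¬ i < xs.length := by omega
    simp [this] at hi
  | succ n ih =>
    intro i p hn hi
    rw [indexFrom] at hi
    by_cases h : i < xs.length
    · rw [dif_pos h] at hi
      by_cases hc : xs.getD i "" = x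
      · rw [if_pos hc] at hi
        injection hi with h2
        omega
      · rw [if_neg hc] at hi
        have := ih (i + 1) p (by omega) hi
        omega
    · rw [dif_neg h] at hi; cases hi

-- placeLoop only inserts keys ≥ pos, so lookups below pos see the accumulator.
lemma placeLoop_getD_lt (template : List String) (gap : String) :
    ∀ pairs pos acc i, i < pos →
      (placeLoop template pairs pos acc).getD i gap = acc.getD i gap := by
  intro pairs
  induction pairs with
  | nil => intro pos acc i hi; simp [placeLoop]
  | cons sc rest ih =>
    intro pos acc i hi
    obtain ⟨s, c⟩ := sc
    rw [placeLoop]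
    cases hidx : indexFrom template c pos with
    | none => rfl
    | some p =>
      have hp : pos ≤ p := indexFrom_ge template c (template.length - pos) pos p le_rfl hidx
      rw [ih (p + 1) _ i (by omega), PySem.Dict.getD_insert, if_neg (by omega)]

lemma placeLoop_map_eq (template : List String) (gap : String) :
    ∀ n pos acc, template.length - pos ≤ n →
      (∀ i, pos ≤ i → acc.getD i gap = gap) → ∀ pairs,
      (List.range' pos (template.length - pos)).map
          (fun i => (placeLoop template pairs pos acc).getD i gap)
        = goMerge gap (template.drop pos) pairs := by
  intro n
  induction n with
  | zero =>
    intro pos acc hn hacc pairs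
    have hge : template.length ≤ pos := by omega
    have : template.length - pos = 0 := by omega
    simp [this, List.drop_eq_nil_of_le hge, goMerge]
  | succ n ih =>
    intro pos acc hn hacc pairs
    by_cases h : pos < template.length
    · have hdropT : template.drop pos = template[pos] :: template.drop (pos + 1) :=
        List.drop_eq_getElem_cons h
      have hr : List.range' pos (template.length - pos)
          = pos :: List.range' (pos + 1) (template.length - (pos + 1)) := by
        have h1 : template.length - pos = (template.length - (pos + 1)) + 1 := by omega
        rw [h1, List.range'_succ]
      cases pairs with
      | nil =>
        have h2 := ih (pos + 1) acc (by omega) (fun i hi => hacc i (by omega)) []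
        simp only [placeLoop] at h2
        rw [hr, hdropT, List.map_cons]
        simp only [placeLoop]
        rw [hacc pos le_rfl, h2]
        simp [goMerge]
      | cons sc rest =>
        obtain ⟨s, c⟩ := sc
        by_cases hc : template[pos] = c
        · have hidx : indexFrom template c pos = some pos := by
            rw [indexFrom, dif_pos h, if_pos]
            simp [List.getD_eq_getElem?_getD, List.getElem?_eq_getElem h, hc]
          have hpl : placeLoop template ((s, c) :: rest) pos acc
              = placeLoop template rest (pos + 1) (acc.insert pos s) := by
            rw [placeLoop, hidx]
          rw [hr, hdropT, List.map_cons, hpl]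
          simp only [goMerge]
          rw [if_pos hc]
          have hhead : (placeLoop template rest (pos + 1) (acc.insert pos s)).getD pos gap = s := by
            rw [placeLoop_getD_lt template gap rest (pos + 1) _ pos (by omega),
              PySem.Dict.getD_insert, if_pos rfl]
          have hacc' : ∀ i, pos + 1 ≤ i → (acc.insert pos s).getD i gap = gap := by
            intro i hi
            rw [PySem.Dict.getD_insert, if_neg (by omega)]
            exact hacc i (by omega)
          rw [hhead, ih (pos + 1) (acc.insert pos s) (by omega) hacc' rest]
        · have hidx : indexFrom template c pos = indexFrom template c (pos + 1) := by
            rw [indexFrom, dif_pos h, if_neg]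
            simp only [List.getD_eq_getElem?_getD, List.getElem?_eq_getElem h, Option.getD_some]
            exact hc
          have hpl : placeLoop template ((s, c) :: rest) pos acc
              = placeLoop template ((s, c) :: rest) (pos + 1) acc := by
            rw [placeLoop, placeLoop, hidx]
          rw [hr, hdropT, List.map_cons, hpl]
          simp only [goMerge]
          rw [if_neg hc]
          have hhead : (placeLoop template ((s, c) :: rest) (pos + 1) acc).getD pos gap = gap := by
            rw [placeLoop_getD_lt template gap _ (pos + 1) _ pos (by omega)]
            exact hacc pos le_rfl
          rw [hhead, ih (pos + 1) acc (by omega) (fun i hi => hacc i (by omega)) ((s, c) :: rest)]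
    · have hge : template.length ≤ pos := by omega
      have : template.length - pos = 0 := by omega
      simp [this, List.drop_eq_nil_of_le hge, goMerge]

-- ===== VERDICT (by name: the statement is the Claim_ definition above) =====
theorem align_to_template_spec : Claim_equal_align_to_template := by
  intro sequence structures template gap _hdom hpre
  unfold Spec_align_to_template
  obtain ⟨hlen, _, _⟩ := hpre
  have hA : align_to_template sequence structures template gap
      = goMerge gap template (sequence.zip structures) := by
    unfold align_to_template
    rw [alignALoop_eq sequence structures template gap hlen template.length 0 0 [] (by omega)]
    simp
  have hB : align_to_template_alt sequence structures template gap
      = goMerge gap template (sequence.zip structures) := by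
    unfold align_to_template_alt
    have := placeLoop_map_eq template gap template.length 0 PySem.Dict.empty (by omega)
      (fun i _ => by simp [PySem.Dict.getD_empty]) (sequence.zip structures)
    simpa [List.range_eq_range'] using this
  rw [hA, hB]
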